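-- pv_equiv track=rewrite | github.com/chailam/Algorithm | Tasks/total_number_of_patterns.py | total_number_of_pattern2
-- ===== SOURCE A (Python) =====
-- light_syllable = 1
--
-- heavy_syllable = 2
--
-- def total_number_of_pattern2(n, total_pattern):
--     if n == 0:
--         return total_pattern
--     elif n == 1:
--         return total_number_of_pattern2(n-1, 1 + total_pattern)
--     elif n == 2:
--         return total_number_of_pattern2(n-2, 2 + total_pattern)
--     else:
--         return total_number_of_pattern2(n - light_syllable, total_pattern) + total_number_of_pattern2(n - heavy_syllable, total_pattern)
-- ===== SOURCE B (Python) =====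
-- def total_number_of_pattern2(n, total_pattern):
--     # Bottom-up DP: result is affine in total_pattern: L(n)*total_pattern + C(n).
--     if n == 0:
--         return total_pattern
--     if n == 1:
--         return total_pattern + 1
--     if n == 2:
--         return total_pattern + 2
--     l, c, lp, cp = 1, 2, 1, 1  # (L(2), C(2), L(1), C(1))
--     for _ in range(3, n + 1):
--         l, c, lp, cp = l + lp, c + cp, l, c
--     return l * total_pattern + c
-- ===== Notes on version B (the rewrite author's own statement) =====
-- stated objective: faster
-- what changed: Replaces the exponential double recursion by a bottom-up linear DP maintaining the coefficients (L,C) of the affine result L(n)*total_pattern + C(n).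
-- outside the precondition, e.g. on total_number_of_pattern2(-1, 0): A raises RecursionError, B returns 2
import Mathlib
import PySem

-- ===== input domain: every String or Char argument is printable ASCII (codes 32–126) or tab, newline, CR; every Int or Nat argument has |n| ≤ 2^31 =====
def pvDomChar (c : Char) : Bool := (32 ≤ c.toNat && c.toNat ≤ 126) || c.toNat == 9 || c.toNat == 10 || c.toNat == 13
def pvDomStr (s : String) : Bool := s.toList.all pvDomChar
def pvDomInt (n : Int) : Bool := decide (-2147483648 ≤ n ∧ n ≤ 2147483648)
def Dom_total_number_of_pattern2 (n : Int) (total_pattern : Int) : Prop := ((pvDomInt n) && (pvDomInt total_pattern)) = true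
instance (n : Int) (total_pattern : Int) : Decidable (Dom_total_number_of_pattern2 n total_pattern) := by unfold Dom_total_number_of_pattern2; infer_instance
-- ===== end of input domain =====

-- B replaces A's exponential double recursion by a linear bottom-up DP on the
-- affine coefficients (L, C) with result L(n)*total_pattern + C(n) (objective: faster, asymptotic).

-- ===== PORT A =====
-- A recurses on n; for n ≥ 0 the recursion terminates with depth n, so the port
-- recurses on the Nat value of n (exact on Pre_, i.e. n ≥ 0; for n < 0 Python never returns).
def total_number_of_pattern2_go : Nat → Int → Int
  | 0, total_pattern => total_pattern
  | 1, total_pattern => total_number_of_pattern2_go 0 (1 + total_pattern)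
  | 2, total_pattern => total_number_of_pattern2_go 0 (2 + total_pattern)
  | (m + 3), total_pattern =>
      total_number_of_pattern2_go (m + 2) total_pattern + total_number_of_pattern2_go (m + 1) total_pattern

def total_number_of_pattern2 (n : Int) (total_pattern : Int) : Int :=
  total_number_of_pattern2_go n.toNat total_pattern

-- ===== PORT B =====
def total_number_of_pattern2_alt (n : Int) (total_pattern : Int) : Int :=
  if n = 0 then total_pattern
  else if n = 1 then total_pattern + 1
  else if n = 2 then total_pattern + 2
  else
    let s := (PySem.List.pyRange 3 (n + 1) 1).foldl
      (fun (st : Int × Int × Int × Int) _ => (st.1 + st.2.2.1, st.2.1 + st.2.2.2, st.1, st.2.1))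
      (1, 2, 1, 1)
    s.1 * total_pattern + s.2.1

-- ===== PRECONDITION & SPEC =====
-- Pre_ excludes n < 0, on which Python A recurses forever (RecursionError).
def Pre_total_number_of_pattern2 (n : Int) (total_pattern : Int) : Prop := 0 ≤ n
instance (n : Int) (total_pattern : Int) : Decidable (Pre_total_number_of_pattern2 n total_pattern) := by unfold Pre_total_number_of_pattern2; infer_instance
def pvWitness_total_number_of_pattern2 : Int × Int := (5, 3)

def Spec_total_number_of_pattern2 (n : Int) (total_pattern : Int) (out : Int) : Prop := out = total_number_of_pattern2_alt n total_pattern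
instance (n : Int) (total_pattern : Int) (out : Int) : Decidable (Spec_total_number_of_pattern2 n total_pattern out) := by unfold Spec_total_number_of_pattern2; infer_instance

-- ===== CLAIM (what is proved, stated in full; the proofs are below) =====
def Claim_equal_total_number_of_pattern2 : Prop := ∀ (n : Int) (total_pattern : Int), Dom_total_number_of_pattern2 n total_pattern → Pre_total_number_of_pattern2 n total_pattern → Spec_total_number_of_pattern2 n total_pattern (total_number_of_pattern2 n total_pattern)

-- ===== LEMMAS AND PROOFS =====

-- coefficient sequences: A's result is L m * t + C m
def pvL : Nat → Int
  | 0 => 1 | 1 => 1 | 2 => 1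
  | (m + 3) => pvL (m + 2) + pvL (m + 1)

def pvC : Nat → Int
  | 0 => 0 | 1 => 1 | 2 => 2
  | (m + 3) => pvC (m + 2) + pvC (m + 1)

theorem pvGo_affine : ∀ (m : Nat) (t : Int),
    total_number_of_pattern2_go m t = pvL m * t + pvC m
  | 0, t => by simp [total_number_of_pattern2_go, pvL, pvC]
  | 1, t => by simp [total_number_of_pattern2_go, pvL, pvC]; ring
  | 2, t => by simp [total_number_of_pattern2_go, pvL, pvC]; omega
  | (m + 3), t => by
      simp only [total_number_of_pattern2_go, pvGo_affine (m + 2) t, pvGo_affine (m + 1) t,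
        pvL, pvC]; ring

-- the fold over range(3, (k+3)+1) computes (L(k+3), C(k+3), L(k+2), C(k+2))
theorem pvFold_eq (k : Nat) :
    (PySem.List.pyRange 3 (3 + (k : Int) + 1) 1).foldl
      (fun (st : Int × Int × Int × Int) _ => (st.1 + st.2.2.1, st.2.1 + st.2.2.2, st.1, st.2.1))
      (1, 2, 1, 1)
    = (pvL (k + 3), pvC (k + 3), pvL (k + 2), pvC (k + 2)) := by
  induction k with
  | zero =>
      rw [show (3 + ((0 : Nat) : Int) + 1) = 3 + 1 by norm_num,
        PySem.List.pyRange_one_singleton]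
      simp [pvL, pvC]
  | succ k ih =>
      rw [show (3 + ((k + 1 : Nat) : Int) + 1) = (3 + (k : Int) + 1) + 1 by push_cast; ring,
        PySem.List.pyRange_one_succ_right (by omega), List.foldl_append, ih]
      simp [pvL, pvC]

theorem pvAlt_affine : ∀ (m : Nat) (t : Int),
    total_number_of_pattern2_alt (m : Int) t = pvL m * t + pvC m
  | 0, t => by simp [total_number_of_pattern2_alt, pvL, pvC]
  | 1, t => by norm_num [total_number_of_pattern2_alt, pvL, pvC]
  | 2, t => by norm_num [total_number_of_pattern2_alt, pvL, pvC]
  | (k + 3), t => by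
      unfold total_number_of_pattern2_alt
      rw [if_neg (by push_cast; omega), if_neg (by push_cast; omega), if_neg (by push_cast; omega),
        show (((k + 3 : Nat) : Int) + 1) = 3 + (k : Int) + 1 by push_cast; ring]
      simp only [pvFold_eq k]

-- ===== VERDICT (by name: the statement is the Claim_ definition above) =====
theorem total_number_of_pattern2_spec : Claim_equal_total_number_of_pattern2 := by
  intro n t _ hpre
  unfold Spec_total_number_of_pattern2 total_number_of_pattern2
  rw [pvGo_affine]
  conv_rhs => rw [(Int.toNat_of_nonneg hpre).symm]
  rw [pvAlt_affine]
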